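-- pv_equiv track=rewrite | github.com/AndiRen/groupSort | groupSort.py | sort_the_keys
-- ===== SOURCE A (Python) =====
-- def sort_the_keys(sorting_dict,min_,max_):
--     """
--     info here
--     """
--
--     sorted_array=[]
--
--     #for each spot in the range, look for a matching key in the dict
--     for i in range(min_, max_+1):
--         try:
--             #populate the instances of a matcing key into an array
--             sorted_array+=[i]*sorting_dict[i]
--         #ignore spots in the range that weren't in the original array
--         except:
--             pass
--
--     return sorted_array
-- ===== SOURCE B (Python) =====
-- def sort_the_keys(sorting_dict, min_, max_):
--     """
--     info here
--     """
--     out = []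
--     # sort only the keys actually present and inside the range, then replicate each by its count
--     for k in sorted(k for k in sorting_dict if min_ <= k <= max_):
--         out += [k] * sorting_dict[k]
--     return out
-- ===== Notes on version B (the rewrite author's own statement) =====
-- stated objective: alternative
-- what changed: Instead of scanning every integer in [min_, max_] and trying a dict lookup at each spot, B sorts only the dict keys that lie in the range and replicates each by its count; it trades the range scan for a sort of the present keys.
import Mathlib
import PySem

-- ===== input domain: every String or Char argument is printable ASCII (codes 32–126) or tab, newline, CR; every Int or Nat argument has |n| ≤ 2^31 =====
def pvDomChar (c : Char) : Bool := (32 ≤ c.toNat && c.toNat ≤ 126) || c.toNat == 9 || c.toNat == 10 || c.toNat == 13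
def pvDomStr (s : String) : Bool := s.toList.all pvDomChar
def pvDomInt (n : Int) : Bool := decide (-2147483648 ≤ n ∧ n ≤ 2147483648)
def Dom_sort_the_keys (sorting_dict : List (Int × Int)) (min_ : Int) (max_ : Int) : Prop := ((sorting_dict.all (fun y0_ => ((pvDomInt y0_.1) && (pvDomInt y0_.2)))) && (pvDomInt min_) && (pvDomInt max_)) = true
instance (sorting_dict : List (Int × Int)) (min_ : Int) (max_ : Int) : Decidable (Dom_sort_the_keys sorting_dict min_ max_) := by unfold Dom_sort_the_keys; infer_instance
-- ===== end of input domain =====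

-- B replaces A's scan of every integer in [min_, max_] by sorting only the dict keys inside the range and replicating each by its count.

-- ===== PORT A =====
def sort_the_keys (sorting_dict : List (Int × Int)) (min_ : Int) (max_ : Int) : List Int :=
  let d := PySem.Dict.ofList sorting_dict
  (PySem.List.pyRange min_ (max_ + 1) 1).foldl (fun acc i =>
    match d.get? i with
    | some c => acc ++ List.replicate c.toNat i   -- [i]*c (empty for c ≤ 0)
    | none   => acc) []                           -- except KeyError: pass

-- ===== PORT B =====
def sort_the_keys_alt (sorting_dict : List (Int × Int)) (min_ : Int) (max_ : Int) : List Int :=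
  let d := PySem.Dict.ofList sorting_dict
  let ks := PySem.List.sorted (d.keys.filter (fun k => decide (min_ ≤ k) && decide (k ≤ max_))) (fun x => x) false
  ks.foldl (fun acc k => acc ++ List.replicate (d.getD k 0).toNat k) []

-- ===== PRECONDITION & SPEC =====
def Spec_sort_the_keys (sorting_dict : List (Int × Int)) (min_ : Int) (max_ : Int) (out : List Int) : Prop := out = sort_the_keys_alt sorting_dict min_ max_
instance (sorting_dict : List (Int × Int)) (min_ : Int) (max_ : Int) (out : List Int) : Decidable (Spec_sort_the_keys sorting_dict min_ max_ out) := by unfold Spec_sort_the_keys; infer_instance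

-- ===== CLAIM (what is proved, stated in full; the proofs are below) =====
def Claim_equal_sort_the_keys : Prop := ∀ (sorting_dict : List (Int × Int)) (min_ : Int) (max_ : Int), Dom_sort_the_keys sorting_dict min_ max_ → Spec_sort_the_keys sorting_dict min_ max_ (sort_the_keys sorting_dict min_ max_)

-- ===== LEMMAS AND PROOFS =====

-- what A appends at spot i
def pvRep (d : PySem.Dict Int Int) (i : Int) : List Int :=
  match d.get? i with
  | some c => List.replicate c.toNat i
  | none   => []

lemma pvRep_eq_of_contains (d : PySem.Dict Int Int) (i : Int) (h : d.contains i = true) :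
    pvRep d i = List.replicate (d.getD i 0).toNat i := by
  unfold pvRep
  rcases hg : d.get? i with _ | c
  · rw [PySem.Dict.contains_eq_isSome_get?, hg] at h; simp at h
  · simp [PySem.Dict.getD_eq_get?_getD, hg]

lemma pvRep_eq_nil (d : PySem.Dict Int Int) (i : Int) (h : d.contains i = false) :
    pvRep d i = [] := by
  unfold pvRep
  rcases hg : d.get? i with _ | c
  · rfl
  · rw [PySem.Dict.contains_eq_isSome_get?, hg] at h; simp at h

-- dropping absent spots from the scan does not change the output
lemma flatMap_filter_contains (d : PySem.Dict Int Int) (l : List Int) :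
    l.flatMap (pvRep d) = (l.filter (fun i => d.contains i)).flatMap (pvRep d) := by
  induction l with
  | nil => rfl
  | cons x t ih =>
    by_cases hx : d.contains x = true
    · simp [List.flatMap_cons, hx, ih]
    · simp only [Bool.not_eq_true] at hx
      simp [List.flatMap_cons, hx, ih, pvRep_eq_nil d x hx]

-- the sorted present-keys-in-range list IS the range filtered to present keys
lemma sorted_keys_eq_filter_range (d : PySem.Dict Int Int) (hnd : d.keys.Nodup) (min_ max_ : Int) :
    PySem.List.sorted (d.keys.filter (fun k => decide (min_ ≤ k) && decide (k ≤ max_))) (fun x => x) false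
      = (PySem.List.pyRange min_ (max_ + 1) 1).filter (fun i => d.contains i) := by
  apply PySem.List.sorted_eq_of_perm_of_pairwise_lt
  · apply (List.perm_ext_iff_of_nodup (List.Nodup.filter _ (PySem.List.nodup_pyRange_one min_ (max_ + 1))) (List.Nodup.filter _ hnd)).mpr
    intro x
    simp only [List.mem_filter, PySem.List.mem_pyRange_one, PySem.Dict.contains_iff_mem_keys,
      Bool.and_eq_true, decide_eq_true_eq]
    constructor
    · rintro ⟨⟨h1, h2⟩, h3⟩; exact ⟨h3, h1, by omega⟩
    · rintro ⟨h3, h1, h2⟩; exact ⟨⟨h1, by omega⟩, h3⟩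
  · exact List.Pairwise.filter _ (PySem.List.pairwise_lt_pyRange_one min_ (max_ + 1))

-- ===== VERDICT (by name: the statement is the Claim_ definition above) =====
theorem sort_the_keys_spec : Claim_equal_sort_the_keys := by
  intro sorting_dict min_ max_ _
  show sort_the_keys sorting_dict min_ max_ = sort_the_keys_alt sorting_dict min_ max_
  unfold sort_the_keys sort_the_keys_alt
  set d := PySem.Dict.ofList sorting_dict with hd
  have hA : (PySem.List.pyRange min_ (max_ + 1) 1).foldl (fun acc i =>
      match d.get? i with
      | some c => acc ++ List.replicate c.toNat i
      | none   => acc) []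
      = (PySem.List.pyRange min_ (max_ + 1) 1).flatMap (pvRep d) := by
    have : (fun (acc : List Int) (i : Int) =>
        match d.get? i with
        | some c => acc ++ List.replicate c.toNat i
        | none   => acc) = fun acc i => acc ++ pvRep d i := by
      funext acc i
      unfold pvRep
      rcases d.get? i with _ | c <;> simp
    rw [this, PySem.List.foldl_append_eq_flatMap]
    simp
  rw [hA, flatMap_filter_contains d, ← sorted_keys_eq_filter_range d (PySem.Dict.nodup_keys_ofList sorting_dict) min_ max_]
  rw [PySem.List.foldl_append_eq_flatMap]
  simp only [List.nil_append]
  apply List.flatMap_congr  -- pvRep = replicate getD on kept (present) keys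
  intro k hk
  have hkk : k ∈ d.keys := List.mem_of_mem_filter ((PySem.List.mem_sorted _ _ _ _).mp hk)
  exact pvRep_eq_of_contains d k ((PySem.Dict.contains_iff_mem_keys d k).mpr hkk)
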